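-- pv_equiv track=rewrite | github.com/ablodge/ccg-utils | paren_utils.py | depth_at
-- ===== SOURCE A (Python) =====
-- def depth_at(text, i):
--     text = _ignore_escaped_parens(text)
--     depth = 0
--     for j, ch in enumerate(text):
--         if ch == ')': depth -= 1
--         if j == i: return depth
--         if ch == '(': depth += 1
--     return -1
--
-- def _ignore_escaped_parens(text):
--     return text.replace(r'\(','*L_PAREN*').replace(r'\)','*R_PAREN*')
-- ===== SOURCE B (Python) =====
-- def depth_at(text, i):
--     t = _ignore_escaped_parens(text)
--     if not (0 <= i < len(t)):
--         return -1
--     return t[:i].count('(') - t[:i + 1].count(')')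
--
-- def _ignore_escaped_parens(text):
--     return text.replace(r'\(', '*L_PAREN*').replace(r'\)', '*R_PAREN*')
-- ===== Notes on version B (the rewrite author's own statement) =====
-- stated objective: simpler
-- what changed: Replaces the running-depth enumerate loop with a closed-form expression: after the same escape substitution, a bounds guard plus count of '(' in text[:i] minus count of ')' in text[:i+1].
import Mathlib
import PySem

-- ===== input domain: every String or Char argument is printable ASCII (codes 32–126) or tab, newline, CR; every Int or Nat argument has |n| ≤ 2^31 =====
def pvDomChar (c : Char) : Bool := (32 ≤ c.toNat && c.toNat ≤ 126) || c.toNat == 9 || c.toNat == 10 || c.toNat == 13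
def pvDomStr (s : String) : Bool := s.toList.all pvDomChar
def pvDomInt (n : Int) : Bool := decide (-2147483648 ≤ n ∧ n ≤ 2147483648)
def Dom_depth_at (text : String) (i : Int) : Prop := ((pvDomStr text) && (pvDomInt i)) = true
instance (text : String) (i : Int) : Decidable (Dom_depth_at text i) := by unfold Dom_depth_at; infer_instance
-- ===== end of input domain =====

-- B replaces A's running-depth enumerate loop with a bounds guard plus a closed-form
-- difference of two character counts over prefixes (objective: simpler).

-- ===== PORT A =====
-- helper _ignore_escaped_parens (shared by both Pythons verbatim)
def ignoreEscapedParens (text : String) : String :=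
  PySem.Str.replace (PySem.Str.replace text "\\(" "*L_PAREN*") "\\)" "*R_PAREN*"

-- the 'for j, ch in enumerate(text)' loop with early return, as structural recursion
def depthLoopA (i : Int) : List Char → Int → Int → Int
  | [], _, _ => -1
  | c :: cs, j, depth =>
    let d := if c = ')' then depth - 1 else depth
    if j = i then d
    else depthLoopA i cs (j + 1) (if c = '(' then d + 1 else d)

def depth_at (text : String) (i : Int) : Int :=
  depthLoopA i (ignoreEscapedParens text).toList 0 0

-- ===== PORT B =====
def depth_at_alt (text : String) (i : Int) : Int :=
  let cs := (ignoreEscapedParens text).toList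
  if 0 ≤ i ∧ i < (cs.length : Int) then
    ((PySem.List.slice cs none (some i)).count '(' : Int)
      - ((PySem.List.slice cs none (some (i + 1))).count ')' : Int)
  else -1

-- ===== PRECONDITION & SPEC =====
def Spec_depth_at (text : String) (i : Int) (out : Int) : Prop := out = depth_at_alt text i
instance (text : String) (i : Int) (out : Int) : Decidable (Spec_depth_at text i out) := by unfold Spec_depth_at; infer_instance

-- ===== CLAIM (what is proved, stated in full; the proofs are below) =====
def Claim_equal_depth_at : Prop := ∀ (text : String) (i : Int), Dom_depth_at text i → Spec_depth_at text i (depth_at text i)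

-- ===== LEMMAS AND PROOFS =====

-- Characterisation of A's loop: started at index j with accumulator d, it returns
-- d + #'(' strictly before the hit minus #')' up to and including the hit, or -1 if i is never reached.
theorem depthLoopA_eq (i : Int) : ∀ (cs : List Char) (j d : Int),
    depthLoopA i cs j d =
      if j ≤ i ∧ i < j + (cs.length : Int) then
        d + ((cs.take (i - j).toNat).count '(' : Int)
          - ((cs.take ((i - j).toNat + 1)).count ')' : Int)
      else -1 := by
  intro cs
  induction cs with
  | nil => intro j d; simp [depthLoopA]
  | cons c cs ih =>
    intro j d
    by_cases hji : j = i
    · subst hji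
      have hin : j ≤ j ∧ j < j + ((c :: cs).length : Int) := by
        refine ⟨le_rfl, ?_⟩; push_cast [List.length_cons]; omega
      rw [show depthLoopA j (c :: cs) j d = (if c = ')' then d - 1 else d) from by
        simp [depthLoopA]]
      rw [if_pos hin]
      simp [List.count_cons]
      split_ifs <;> simp_all <;> omega
    · have hrec : depthLoopA i (c :: cs) j d =
          depthLoopA i cs (j + 1)
            (if c = '(' then (if c = ')' then d - 1 else d) + 1 else (if c = ')' then d - 1 else d)) := by
        simp [depthLoopA, hji]
      rw [hrec, ih]
      by_cases hin : j + 1 ≤ i ∧ i < j + 1 + (cs.length : Int)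
      · have hin' : j ≤ i ∧ i < j + ((c :: cs).length : Int) := by
          push_cast [List.length_cons]; omega
        rw [if_pos hin, if_pos hin']
        have h1 : (i - j).toNat = (i - (j + 1)).toNat + 1 := by omega
        rw [h1]
        simp only [List.take_succ_cons, List.count_cons]
        split_ifs <;> simp_all <;> omega
      · have hin' : ¬ (j ≤ i ∧ i < j + ((c :: cs).length : Int)) := by
          push_cast [List.length_cons] at hin ⊢; omega
        rw [if_neg hin, if_neg hin']

-- ===== VERDICT (by name: the statement is the Claim_ definition above) =====
theorem depth_at_spec : Claim_equal_depth_at := by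
  intro text i _
  unfold Spec_depth_at depth_at depth_at_alt
  set cs := (ignoreEscapedParens text).toList with hcs
  rw [depthLoopA_eq]
  by_cases h : 0 ≤ i ∧ i < (cs.length : Int)
  · rw [if_pos (show (0:Int) ≤ i ∧ i < 0 + (cs.length : Int) by omega)]
    rw [if_pos h]
    rw [PySem.List.slice_to cs h.1, PySem.List.slice_to cs (show (0:Int) ≤ i + 1 by omega)]
    rw [show (i - 0).toNat = i.toNat by omega, show (i + 1).toNat = i.toNat + 1 by omega]
    ring
  · rw [if_neg (show ¬ ((0:Int) ≤ i ∧ i < 0 + (cs.length : Int)) by omega), if_neg h]
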